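-- pv_equiv track=rewrite | github.com/WhiteBear2021/pythonProject | 알고리즘withPy/카카오기출/2단계_level/괄호변환.py | parse
-- ===== SOURCE A (Python) =====
-- def parse(s):
--     correct=True
--     left=0
--     right=0
--     mystack=[]
--     for i in range(len(s)):
--         if s[i]=="(":
--             left+=1
--             mystack.append("(")
--         else:
--             right+=1
--             if len(mystack)==0:
--                 correct=False
--             else:
--                 mystack.pop()
--         if left==right:
--             return i+1, correct
--     return 0, False
-- ===== SOURCE B (Python) =====
-- def parse(s):
--     for k in range(1, len(s) + 1):
--         if 2 * s[:k].count("(") == k: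
--             return k, s[0] == "("
--     return 0, False
-- ===== Notes on version B (the rewrite author's own statement) =====
-- stated objective: alternative
-- what changed: Instead of A's single stateful scan with a stack and left/right counters, B tests each candidate prefix length k = 1..len(s) directly, recounting the opening parentheses of the slice of the first k characters and returning the first k where they are exactly half; correctness is derived after the search from whether the first character is an opening parenthesis, not tracked inside the loop.
import Mathlib
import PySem

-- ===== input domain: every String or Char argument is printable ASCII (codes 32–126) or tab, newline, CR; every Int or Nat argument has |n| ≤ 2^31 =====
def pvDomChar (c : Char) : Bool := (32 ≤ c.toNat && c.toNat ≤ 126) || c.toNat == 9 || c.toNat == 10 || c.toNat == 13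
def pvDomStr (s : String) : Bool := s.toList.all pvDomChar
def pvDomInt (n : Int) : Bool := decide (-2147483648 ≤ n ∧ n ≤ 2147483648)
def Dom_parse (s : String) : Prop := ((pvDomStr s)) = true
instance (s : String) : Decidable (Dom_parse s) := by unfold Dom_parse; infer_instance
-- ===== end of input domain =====

-- B replaces A's stateful scan (stack + left/right counters + in-loop correctness flag) by a
-- generate-and-test over prefix lengths: the first k whose prefix has exactly k/2 opening
-- parentheses, with correctness derived afterwards from the first character; a genuinely
-- different (and slower) decomposition.

-- ===== PORT A =====
-- A's loop over indices, carried as structural recursion over the character list with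
-- the same state (i, left, right, correct, mystack).
def parseGoA (cs : List Char) (i left right : Int) (correct : Bool) (stack : List Char) :
    Int × Bool :=
  match cs with
  | [] => (0, false)
  | c :: rest =>
    if c = '(' then
      let left' := left + 1
      let stack' := '(' :: stack
      if left' = right then (i + 1, correct) else parseGoA rest (i + 1) left' right correct stack'
    else
      let right' := right + 1
      if stack.length = 0 then
        if left = right' then (i + 1, false) else parseGoA rest (i + 1) left right' false stack
      else
        let stack' := stack.tail
        if left = right' then (i + 1, correct) else parseGoA rest (i + 1) left right' correct stack'

def parse (s : String) : Int × Bool := parseGoA s.toList 0 0 0 true []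

-- ===== PORT B =====
-- B's loop 'for k in range(1, len(s) + 1)': recursion over the remaining range list;
-- s[:k].count("(") is the substring count of "(" in the string slice, ported on the
-- character list (PySem string ops are defined on List Char): Chars.count of the slice.
def parseGoAlt (cs : List Char) (ks : List Int) : Int × Bool :=
  match ks with
  | [] => (0, false)
  | k :: rest =>
    if 2 * ((PySem.Chars.count (PySem.List.slice cs none (some k)) ['(']) : Int) = k then
      (k, PySem.List.pyGet? cs 0 == some '(')   -- cs[0] == "(" : only reached with cs ≠ []
    else parseGoAlt cs rest

def parse_alt (s : String) : Int × Bool :=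
  parseGoAlt s.toList (PySem.List.pyRange 1 ((s.toList.length : Int) + 1) 1)

-- ===== PRECONDITION & SPEC =====
def Spec_parse (s : String) (out : Int × Bool) : Prop := out = parse_alt s
instance (s : String) (out : Int × Bool) : Decidable (Spec_parse s out) := by unfold Spec_parse; infer_instance

-- ===== CLAIM (what is proved, stated in full; the proofs are below) =====
def Claim_equal_parse : Prop := ∀ (s : String), Dom_parse s → Spec_parse s (parse s)

-- ===== LEMMAS AND PROOFS =====

-- Proof-side common form: the first prefix length j ∈ [1, n] whose running balance is zero.
def pvW (l : List Char) : Int := 2 * (l.count '(' : Int) - l.length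

def pvFirst (cs : List Char) : Option Nat :=
  (List.range' 1 cs.length).find? (fun j => pvW (cs.take j) == 0)

theorem pvW_cons (c : Char) (l : List Char) :
    pvW (c :: l) = (if c = '(' then 1 else -1) + pvW l := by
  simp only [pvW, List.count_cons, List.length_cons]
  by_cases hc : c = '(' <;> simp [hc] <;> ring

-- Bool-level congruence for Int equality tests.
theorem beq_eq_beq_int (a b c d : Int) (h : a = b ↔ c = d) : (a == b) = (c == d) := by
  by_cases hab : a = b
  · simp [hab, h.mp hab]
  · simp [hab, show ¬c = d from fun hcd => hab (h.mpr hcd)]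

-- find? only looks at the predicate's value on members (no such lemma in the libraries).
theorem find?_congr_mem {α : Type} (p q : α → Bool) (l : List α)
    (h : ∀ x ∈ l, p x = q x) : l.find? p = l.find? q := by
  induction l with
  | nil => rfl
  | cons a l ih =>
    have ha := h a (List.mem_cons_self)
    rw [List.find?_cons, List.find?_cons, ha, ih (fun x hx => h x (List.mem_cons_of_mem a hx))]

-- A-side characterisation, part 1: once correct is false and the balance negative, A returns
-- the first-zero index with flag false, whatever the stack holds.
theorem goA_neg (cs : List Char) :
    ∀ (i left right : Int) (stack : List Char), left < right →
    parseGoA cs i left right false stack =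
      (match (List.range' 1 cs.length).find? (fun j => (left - right) + pvW (cs.take j) == 0) with
       | none => (0, false)
       | some j => (i + j, false)) := by
  induction cs with
  | nil => intro i left right stack _; rfl
  | cons c rest ih =>
    intro i left right stack h
    have hrange : List.range' 1 (c :: rest).length = 1 :: List.range' 2 rest.length := by
      rw [List.length_cons, List.range'_succ]
    have htake1 : (c :: rest).take 1 = [c] := rfl
    have hshift : List.range' 2 rest.length = (List.range' 1 rest.length).map (· + 1) :=
      List.range'_succ_left
    by_cases hc : c = '('
    · by_cases hz : left + 1 = right
      · have hp : ((left - right) + pvW ((c :: rest).take 1) == 0) = true := by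
          simp [pvW, hc]; omega
        simp only [parseGoA, hrange, List.find?_cons, hp]
        rw [if_pos hc, if_pos hz]
        norm_num
      · have hp : ((left - right) + pvW ((c :: rest).take 1) == 0) = false := by
          simp [pvW, hc]; omega
        simp only [parseGoA, hrange, List.find?_cons, hp]
        rw [if_pos hc, if_neg hz,
            ih (i + 1) (left + 1) right ('(' :: stack) (by omega)]
        rw [hshift, List.find?_map]
        have hpred : ∀ x ∈ List.range' 1 rest.length,
            ((fun j => (left + 1 - right) + pvW (rest.take j) == 0) x) =
            ((fun j => (left - right) + pvW ((c :: rest).take j) == 0) ∘ (· + 1)) x := by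
          intro x _
          simp only [Function.comp]
          rw [show (c :: rest).take (x + 1) = c :: rest.take x from rfl, pvW_cons, if_pos hc]
          exact beq_eq_beq_int _ _ _ _ (by omega)
        rw [find?_congr_mem _ _ _ hpred]
        cases hf : (List.range' 1 rest.length).find?
            ((fun j => (left - right) + pvW ((c :: rest).take j) == 0) ∘ (· + 1)) with
        | none => rfl
        | some j =>
          simp only [Option.map_some, Prod.mk.injEq]
          refine ⟨by push_cast; ring, by simp⟩
    · have hz : ¬(left = right + 1) := by omega
      have hp : ((left - right) + pvW ((c :: rest).take 1) == 0) = false := by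
        simp [pvW, hc]; omega
      have hpred : ∀ x ∈ List.range' 1 rest.length,
          ((fun j => (left - (right + 1)) + pvW (rest.take j) == 0) x) =
          ((fun j => (left - right) + pvW ((c :: rest).take j) == 0) ∘ (· + 1)) x := by
        intro x _
        simp only [Function.comp]
        rw [show (c :: rest).take (x + 1) = c :: rest.take x from rfl, pvW_cons, if_neg hc]
        exact beq_eq_beq_int _ _ _ _ (by omega)
      by_cases hs : stack.length = 0
      · simp only [parseGoA, hrange, List.find?_cons, hp]
        rw [if_neg hc, if_pos hs, if_neg hz,
            ih (i + 1) left (right + 1) stack (by omega),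
            hshift, List.find?_map, find?_congr_mem _ _ _ hpred]
        cases (List.range' 1 rest.length).find?
            ((fun j => (left - right) + pvW ((c :: rest).take j) == 0) ∘ (· + 1)) with
        | none => rfl
        | some j =>
          simp only [Option.map_some, Prod.mk.injEq]
          refine ⟨by push_cast; ring, by simp⟩
      · simp only [parseGoA, hrange, List.find?_cons, hp]
        rw [if_neg hc, if_neg hs, if_neg hz,
            ih (i + 1) left (right + 1) stack.tail (by omega),
            hshift, List.find?_map, find?_congr_mem _ _ _ hpred]
        cases (List.range' 1 rest.length).find?
            ((fun j => (left - right) + pvW ((c :: rest).take j) == 0) ∘ (· + 1)) with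
        | none => rfl
        | some j =>
          simp only [Option.map_some, Prod.mk.injEq]
          refine ⟨by push_cast; ring, by simp⟩

-- A-side characterisation, part 2: with correct still true, positive balance and the stack
-- holding exactly the surplus, A returns the first-zero index with flag true.
theorem goA_pos (cs : List Char) :
    ∀ (i left right : Int) (stack : List Char), right < left →
    (stack.length : Int) = left - right →
    parseGoA cs i left right true stack =
      (match (List.range' 1 cs.length).find? (fun j => (left - right) + pvW (cs.take j) == 0) with
       | none => (0, false)
       | some j => (i + j, true)) := by
  induction cs with
  | nil => intro i left right stack _ _; rfl
  | cons c rest ih =>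
    intro i left right stack h hs
    have hrange : List.range' 1 (c :: rest).length = 1 :: List.range' 2 rest.length := by
      rw [List.length_cons, List.range'_succ]
    have htake1 : (c :: rest).take 1 = [c] := rfl
    have hshift : List.range' 2 rest.length = (List.range' 1 rest.length).map (· + 1) :=
      List.range'_succ_left
    by_cases hc : c = '('
    · have hz : ¬(left + 1 = right) := by omega
      have hp : ((left - right) + pvW ((c :: rest).take 1) == 0) = false := by
        simp [pvW, hc]; omega
      have hpred : ∀ x ∈ List.range' 1 rest.length,
          ((fun j => (left + 1 - right) + pvW (rest.take j) == 0) x) =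
          ((fun j => (left - right) + pvW ((c :: rest).take j) == 0) ∘ (· + 1)) x := by
        intro x _
        simp only [Function.comp]
        rw [show (c :: rest).take (x + 1) = c :: rest.take x from rfl, pvW_cons, if_pos hc]
        exact beq_eq_beq_int _ _ _ _ (by omega)
      simp only [parseGoA, hrange, List.find?_cons, hp]
      rw [if_pos hc, if_neg hz,
          ih (i + 1) (left + 1) right ('(' :: stack)
            (by omega) (by simp only [List.length_cons]; push_cast; omega),
          hshift, List.find?_map, find?_congr_mem _ _ _ hpred]
      cases (List.range' 1 rest.length).find?
          ((fun j => (left - right) + pvW ((c :: rest).take j) == 0) ∘ (· + 1)) with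
      | none => rfl
      | some j =>
        simp only [Option.map_some, Prod.mk.injEq]
        refine ⟨by push_cast; ring, by simp⟩
    · have hne : ¬(stack.length = 0) := by omega
      by_cases hz : left = right + 1
      · have hp : ((left - right) + pvW ((c :: rest).take 1) == 0) = true := by
          simp [pvW, hc]; omega
        simp only [parseGoA, hrange, List.find?_cons, hp]
        rw [if_neg hc, if_neg hne, if_pos hz]
        norm_num
      · have hp : ((left - right) + pvW ((c :: rest).take 1) == 0) = false := by
          simp [pvW, hc]; omega
        have hlen : (stack.tail.length : Int) = left - (right + 1) := by
          rw [List.length_tail]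
          push_cast [Nat.cast_sub (show 1 ≤ stack.length by omega)]
          omega
        have hpred : ∀ x ∈ List.range' 1 rest.length,
            ((fun j => (left - (right + 1)) + pvW (rest.take j) == 0) x) =
            ((fun j => (left - right) + pvW ((c :: rest).take j) == 0) ∘ (· + 1)) x := by
          intro x _
          simp only [Function.comp]
          rw [show (c :: rest).take (x + 1) = c :: rest.take x from rfl, pvW_cons, if_neg hc]
          exact beq_eq_beq_int _ _ _ _ (by omega)
        simp only [parseGoA, hrange, List.find?_cons, hp]
        rw [if_neg hc, if_neg hne, if_neg hz,
            ih (i + 1) left (right + 1) stack.tail (by omega) hlen,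
            hshift, List.find?_map, find?_congr_mem _ _ _ hpred]
        cases (List.range' 1 rest.length).find?
            ((fun j => (left - right) + pvW ((c :: rest).take j) == 0) ∘ (· + 1)) with
        | none => rfl
        | some j =>
          simp only [Option.map_some, Prod.mk.injEq]
          refine ⟨by push_cast; ring, by simp⟩

-- A computes the common form.
theorem parse_eq_first (s : String) :
    parse s = (match pvFirst s.toList with
               | none => (0, false)
               | some j => ((j : Int), s.toList.head? == some '(')) := by
  unfold parse pvFirst
  cases hcs : s.toList with
  | nil => rfl
  | cons c rest =>
    have hrange : List.range' 1 (c :: rest).length = 1 :: List.range' 2 rest.length := by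
      rw [List.length_cons, List.range'_succ]
    have htake1 : (c :: rest).take 1 = [c] := rfl
    by_cases hc : c = '('
    · have hp : (pvW ((c :: rest).take 1) == 0) = false := by
        simp [pvW, hc]
      have hA : parseGoA (c :: rest) 0 0 0 true [] =
          parseGoA rest (0 + 1) (0 + 1) 0 true ['('] := by
        simp only [parseGoA]
        rw [if_pos hc, if_neg (by omega : ¬((0 : Int) + 1 = 0))]
      rw [hA, goA_pos rest (0 + 1) (0 + 1) 0 ['('] (by omega) (by simp),
          hrange, List.find?_cons, hp,
          show List.range' 2 rest.length = (List.range' 1 rest.length).map (· + 1) from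
            List.range'_succ_left,
          List.find?_map]
      have hpred : ∀ x ∈ List.range' 1 rest.length,
          ((fun j => (0 + 1 - 0 : Int) + pvW (rest.take j) == 0) x) =
          ((fun j => pvW ((c :: rest).take j) == 0) ∘ (· + 1)) x := by
        intro x _
        simp only [Function.comp]
        rw [show (c :: rest).take (x + 1) = c :: rest.take x from rfl, pvW_cons, if_pos hc]
        exact beq_eq_beq_int _ _ _ _ (by omega)
      rw [find?_congr_mem _ _ _ hpred]
      cases (List.range' 1 rest.length).find?
          ((fun j => pvW ((c :: rest).take j) == 0) ∘ (· + 1)) with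
      | none => rfl
      | some j =>
        simp only [Option.map_some, Prod.mk.injEq, List.head?_cons]
        refine ⟨by push_cast; ring, by simp [hc]⟩
    · have hp : (pvW ((c :: rest).take 1) == 0) = false := by
        simp [pvW, hc]
      have hA : parseGoA (c :: rest) 0 0 0 true [] =
          parseGoA rest (0 + 1) 0 (0 + 1) false [] := by
        simp only [parseGoA, List.length_nil]
        rw [if_neg hc, if_pos trivial, if_neg (by omega : ¬((0 : Int) = 0 + 1))]
      rw [hA, goA_neg rest (0 + 1) 0 (0 + 1) [] (by omega),
          hrange, List.find?_cons, hp,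
          show List.range' 2 rest.length = (List.range' 1 rest.length).map (· + 1) from
            List.range'_succ_left,
          List.find?_map]
      have hpred : ∀ x ∈ List.range' 1 rest.length,
          ((fun j => (0 - (0 + 1) : Int) + pvW (rest.take j) == 0) x) =
          ((fun j => pvW ((c :: rest).take j) == 0) ∘ (· + 1)) x := by
        intro x _
        simp only [Function.comp]
        rw [show (c :: rest).take (x + 1) = c :: rest.take x from rfl, pvW_cons, if_neg hc]
        exact beq_eq_beq_int _ _ _ _ (by omega)
      rw [find?_congr_mem _ _ _ hpred]
      cases (List.range' 1 rest.length).find?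
          ((fun j => pvW ((c :: rest).take j) == 0) ∘ (· + 1)) with
      | none => rfl
      | some j =>
        simp only [Option.map_some, Prod.mk.injEq, List.head?_cons]
        refine ⟨by push_cast; ring, by simp [hc]⟩

-- str.count of the single-character pattern "(" is the character count (count.go with
-- enough fuel never matches across more than one character).
theorem count_go_single (l : List Char) : ∀ (fuel acc : Nat), l.length ≤ fuel →
    PySem.Chars.count.go ['('] fuel l acc = acc + l.count '(' := by
  induction l with
  | nil => intro fuel acc _; cases fuel <;> simp [PySem.Chars.count.go]
  | cons h t ih =>
    intro fuel acc hf
    cases fuel with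
    | zero => simp at hf
    | succ f =>
      unfold PySem.Chars.count.go
      by_cases hh : h = '('
      · simp only [List.isPrefixOf, hh, List.count_cons]
        simp [ih f (acc + 1) (by simpa using hf)]
        omega
      · rw [if_neg (by simp [Ne.symm hh])]
        simp [ih f acc (by simpa using hf), hh]

theorem chars_count_single (l : List Char) : PySem.Chars.count l ['('] = l.count '(' := by
  simp [PySem.Chars.count]
  rw [count_go_single l l.length 0 le_rfl]
  omega

-- B's range loop, over any tail range' a m of prefix lengths.
theorem goAlt_find (cs : List Char) (m : Nat) :
    ∀ (a : Nat), parseGoAlt cs (PySem.List.pyRange (a : Int) ((a : Int) + (m : Int)) 1) =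
      (match (List.range' a m).find?
          (fun j => 2 * ((cs.take j).count '(' : Int) == (j : Int)) with
       | none => (0, false)
       | some j => ((j : Int), PySem.List.pyGet? cs 0 == some '(')) := by
  induction m with
  | zero =>
    intro a
    rw [PySem.List.pyRange_one_eq_nil (by omega)]
    rfl
  | succ m ih =>
    intro a
    rw [PySem.List.pyRange_one_cons (by push_cast; omega),
        show ((a : Int) + ((m : Nat) + 1 : Nat)) = ((a + 1 : Nat) : Int) + (m : Int) from by
          push_cast; ring,
        List.range'_succ, List.find?_cons]
    simp only [parseGoAlt]
    rw [PySem.List.slice_to_natCast, chars_count_single]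
    by_cases hp : 2 * ((cs.take a).count '(' : Int) = (a : Int)
    · rw [if_pos hp, show (2 * ((cs.take a).count '(' : Int) == (a : Int)) = true from by
        simp [hp]]
    · rw [if_neg hp, show (2 * ((cs.take a).count '(' : Int) == (a : Int)) = false from by
        simp [hp],
        show ((a : Int) + 1) = ((a + 1 : Nat) : Int) from by push_cast; ring, ih (a + 1)]

-- B computes the common form: the predicates agree on j ∈ [1, n] (there (take j).length = j).
theorem parse_alt_eq_first (s : String) :
    parse_alt s = (match pvFirst s.toList with
                   | none => (0, false)
                   | some j => ((j : Int), s.toList.head? == some '(')) := by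
  unfold parse_alt pvFirst
  have hb : PySem.List.pyRange 1 ((s.toList.length : Int) + 1) 1 =
      PySem.List.pyRange ((1 : Nat) : Int) (((1 : Nat) : Int) + (s.toList.length : Int)) 1 := by
    push_cast
    rw [Int.add_comm]
  rw [hb, goAlt_find s.toList s.toList.length 1]
  have hpred : ∀ x ∈ List.range' 1 s.toList.length,
      ((fun j => 2 * ((s.toList.take j).count '(' : Int) == (j : Int)) x) =
      ((fun j => pvW (s.toList.take j) == 0) x) := by
    intro x hx
    have hxle : x ≤ s.toList.length := by
      have := List.mem_range'.mp hx
      omega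
    have hlen : ((s.toList.take x).length : Int) = (x : Int) := by
      rw [List.length_take]; push_cast; omega
    simp only [pvW]
    rw [hlen]
    exact beq_eq_beq_int _ _ _ _ (by omega)
  rw [find?_congr_mem _ _ _ hpred]
  cases hf : (List.range' 1 s.toList.length).find? (fun j => pvW (s.toList.take j) == 0) with
  | none => rfl
  | some j =>
    have hmem : j ∈ List.range' 1 s.toList.length := List.mem_of_find?_eq_some hf
    have hj := List.mem_range'.mp hmem
    have hget : PySem.List.pyGet? s.toList 0 = s.toList.head? := by
      cases s.toList with
      | nil => rfl
      | cons c rest => simp [PySem.List.pyGet?, PySem.List.pyIdx?]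
    rw [hget]

-- ===== VERDICT (by name: the statement is the Claim_ definition above) =====
theorem parse_spec : Claim_equal_parse := by
  intro s _
  unfold Spec_parse
  rw [parse_eq_first, parse_alt_eq_first]
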